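-- pv_equiv track=rewrite | github.com/AlexeyKozyakov/DebtBot | parsing/parser.py | __extract_expression
-- ===== SOURCE A (Python) =====
-- from typing import Optional, TypedDict
--
-- EXPRESSION_SIMBOLS = {'+', '-', '*', '/', '(', ')', '0', '1', '2', '3', '4', '5', '6', '7', '8', '9'}
--
-- def __extract_expression(words: list[str]) -> Optional[str]:
--     expression = ''
--     for word in words:
--         for symbol in word:
--             if symbol in EXPRESSION_SIMBOLS:
--                 expression += symbol
--             else:
--                 return expression
--     return expression
-- ===== SOURCE B (Python) =====
-- def __extract_expression(words):
--     s = ''.join(words)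
--     i = 0
--     while i < len(s) and s[i] in '0123456789+-*/()':
--         i += 1
--     return s[:i]
-- ===== Notes on version B (the rewrite author's own statement) =====
-- stated objective: simpler
-- what changed: Joins all words into one string first, then a single index scan finds the length of the leading run of expression characters and one slice returns it, replacing A's nested loops with a growing accumulator string and an early return.
import Mathlib
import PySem

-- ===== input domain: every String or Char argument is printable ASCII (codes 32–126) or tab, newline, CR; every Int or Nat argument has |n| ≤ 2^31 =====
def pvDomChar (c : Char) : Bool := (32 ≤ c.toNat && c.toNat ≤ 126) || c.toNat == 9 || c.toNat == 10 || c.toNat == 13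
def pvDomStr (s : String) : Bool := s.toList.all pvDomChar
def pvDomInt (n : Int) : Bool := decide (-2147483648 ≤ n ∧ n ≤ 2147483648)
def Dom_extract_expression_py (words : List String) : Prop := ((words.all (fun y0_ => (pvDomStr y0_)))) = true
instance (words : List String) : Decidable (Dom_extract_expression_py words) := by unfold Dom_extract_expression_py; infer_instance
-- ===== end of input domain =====

-- B joins the words into one string and returns the leading run of expression
-- characters via a single index scan and one slice (objective: simpler).


-- ===== PORT A =====
-- membership test 'symbol in EXPRESSION_SIMBOLS'
def aIsSym (c : Char) : Bool :=
  (['+', '-', '*', '/', '(', ')', '0', '1', '2', '3', '4', '5', '6', '7', '8', '9'] : List Char).contains c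

-- inner 'for symbol in word' loop; Bool = early return taken
def aInner (expr : List Char) : List Char → (List Char × Bool)
  | [] => (expr, false)
  | c :: cs => if aIsSym c then aInner (expr ++ [c]) cs else (expr, true)

-- outer 'for word in words' loop
def aOuter (expr : List Char) : List String → List Char
  | [] => expr
  | w :: ws =>
      match aInner expr w.toList with
      | (e, true) => e
      | (e, false) => aOuter e ws

def extract_expression_py (words : List String) : Option String :=
  some (String.ofList (aOuter [] words))

-- ===== PORT B =====
-- membership test "s[i] in '0123456789+-*/()'"
def bIsSym (c : Char) : Bool := "0123456789+-*/()".toList.contains c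

-- the 'while i < len(s) and s[i] in …: i += 1' loop, returning the final i
def bLoop (s : List Char) (i : Nat) : Nat :=
  if h : i < s.length then
    if bIsSym s[i] then bLoop s (i + 1) else i
  else i
termination_by s.length - i
decreasing_by omega

def extract_expression_py_alt (words : List String) : Option String :=
  let s := (words.map String.toList).flatten   -- ''.join(words)
  some (String.ofList (s.take (bLoop s 0)))        -- s[:i]

-- ===== PRECONDITION & SPEC =====
def Spec_extract_expression_py (words : List String) (out : Option String) : Prop := out = extract_expression_py_alt words
instance (words : List String) (out : Option String) : Decidable (Spec_extract_expression_py words out) := by unfold Spec_extract_expression_py; infer_instance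

-- ===== CLAIM (what is proved, stated in full; the proofs are below) =====
def Claim_equal_extract_expression_py : Prop := ∀ (words : List String), Dom_extract_expression_py words → Spec_extract_expression_py words (extract_expression_py words)

-- ===== LEMMAS AND PROOFS =====

theorem isSym_eq (c : Char) : aIsSym c = bIsSym c := by
  unfold aIsSym bIsSym
  rw [Bool.eq_iff_iff]
  simp
  tauto

theorem aInner_eq (cs : List Char) : ∀ expr,
    aInner expr cs = (expr ++ cs.takeWhile bIsSym, !cs.all bIsSym) := by
  induction cs with
  | nil => simp [aInner, List.takeWhile]
  | cons c cs ih =>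
      intro expr
      simp only [aInner, isSym_eq]
      by_cases h : bIsSym c
      · simp [h, ih, List.all_cons]
      · simp [h, List.all_cons]

theorem tw_all {l : List Char} (h : l.all bIsSym = true) :
    l.takeWhile bIsSym = l :=
  List.takeWhile_eq_self_iff.mpr (by simpa [List.all_eq_true] using h)

theorem tw_append_all {l m : List Char} (h : l.all bIsSym = true) :
    (l ++ m).takeWhile bIsSym = l ++ m.takeWhile bIsSym := by
  rw [List.takeWhile_append, tw_all h]
  simp

theorem tw_append_not_all {l m : List Char} (h : ¬ l.all bIsSym = true) :
    (l ++ m).takeWhile bIsSym = l.takeWhile bIsSym := by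
  rw [List.takeWhile_append, if_neg]
  intro hlen
  exact h (by
    have := List.takeWhile_eq_self_iff.mp ((List.takeWhile_prefix _).eq_of_length hlen)
    simpa [List.all_eq_true] using this)

theorem aOuter_eq (ws : List String) : ∀ expr,
    aOuter expr ws = expr ++ ((ws.map String.toList).flatten).takeWhile bIsSym := by
  induction ws with
  | nil => simp [aOuter]
  | cons w ws ih =>
      intro expr
      simp only [aOuter, aInner_eq, List.map_cons, List.flatten_cons]
      by_cases h : w.toList.all bIsSym = true
      · simp only [h, Bool.not_true]
        rw [ih, tw_append_all h, tw_all h, List.append_assoc]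
      · have h' : w.toList.all bIsSym = false := eq_false_of_ne_true h
        simp [h', tw_append_not_all h]

theorem bLoop_take (s : List Char) (i : Nat) :
    s.take (bLoop s i) = s.take i ++ (s.drop i).takeWhile bIsSym := by
  induction hn : s.length - i using Nat.strong_induction_on generalizing i with
  | _ n ih =>
    rw [bLoop]
    by_cases hi : i < s.length
    · have hdrop : s.drop i = s[i] :: s.drop (i + 1) := List.drop_eq_getElem_cons hi
      rw [dif_pos hi]
      by_cases hs : bIsSym s[i] = true
      · rw [if_pos hs, ih (s.length - (i + 1)) (by omega) (i + 1) rfl]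
        rw [hdrop, List.takeWhile_cons, if_pos hs]
        have ht : s.take (i + 1) = s.take i ++ [s[i]] := by
          rw [List.take_add_one, List.getElem?_eq_getElem hi]
          rfl
        rw [ht, List.append_assoc]
        rfl
      · rw [if_neg hs, hdrop, List.takeWhile_cons, if_neg hs]
        simp
    · rw [dif_neg hi]
      simp [List.drop_eq_nil_of_le (by omega : s.length ≤ i)]

-- ===== VERDICT (by name: the statement is the Claim_ definition above) =====
theorem extract_expression_py_spec : Claim_equal_extract_expression_py := by
  intro words _
  simp only [Spec_extract_expression_py, extract_expression_py, extract_expression_py_alt]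
  rw [aOuter_eq, bLoop_take]
  simp
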